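-- pv_equiv track=rewrite | github.com/gmancuso74/aoc2024-py | day5.py | min_index
-- ===== SOURCE A (Python) =====
-- def min_index(ordering:list[int],valueList:list[int]):
--     result=None
--     for value in valueList:
--         if value in ordering:
--             idx=ordering.index(value)
--             if result is None or idx<result:
--                 result=idx
--     return result
-- ===== SOURCE B (Python) =====
-- def min_index(ordering: list[int], valueList: list[int]):
--     members = set(valueList)
--     for i, v in enumerate(ordering):
--         if v in members:
--             return i
--     return None
-- ===== Notes on version B (the rewrite author's own statement) =====
-- stated objective: faster
-- what changed: Instead of scanning ordering once per element of valueList and keeping a running minimum index, B builds a set from valueList once and returns the index of the first element of ordering that is in the set (early exit, single left-to-right scan of ordering).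
import Mathlib
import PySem

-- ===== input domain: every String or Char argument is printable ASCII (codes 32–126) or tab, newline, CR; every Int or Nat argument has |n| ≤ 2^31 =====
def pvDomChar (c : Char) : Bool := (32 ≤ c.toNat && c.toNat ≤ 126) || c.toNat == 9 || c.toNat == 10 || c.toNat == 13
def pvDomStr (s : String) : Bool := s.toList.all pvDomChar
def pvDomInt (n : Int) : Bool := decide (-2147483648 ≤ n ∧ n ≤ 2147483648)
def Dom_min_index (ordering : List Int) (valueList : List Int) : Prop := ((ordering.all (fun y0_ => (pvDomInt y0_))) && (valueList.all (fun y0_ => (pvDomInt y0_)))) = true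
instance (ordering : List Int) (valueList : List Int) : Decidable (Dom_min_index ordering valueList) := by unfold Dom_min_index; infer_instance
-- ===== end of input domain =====

-- B replaces A's per-value scans of ordering (with a running minimum) by one early-exit
-- left-to-right scan of ordering against a set built once from valueList (objective: faster).

-- ===== PORT A =====
-- one loop step of A: 'if value in ordering: idx = ordering.index(value); if result is None or idx < result: result = idx'
-- (the 'none' branch of the inner match is unreachable: 'ordering.index' succeeds under the membership guard)
def min_index_step (ordering : List Int) (result : Option Int) (value : Int) : Option Int :=
  if value ∈ ordering then
    match PySem.List.index? ordering value with
    | some idxN =>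
      let idx : Int := idxN
      match result with
      | none => some idx
      | some r => if idx < r then some idx else result
    | none => result
  else result

def min_index (ordering : List Int) (valueList : List Int) : Option Int :=
  valueList.foldl (min_index_step ordering) none

-- ===== PORT B =====
-- 'for i, v in enumerate(ordering): if v in members: return i' as structural recursion with a counter
def min_index_alt_scan (members : PySem.Set Int) : List Int → Int → Option Int
  | [], _ => none
  | v :: rest, i => if PySem.Set.contains members v then some i else min_index_alt_scan members rest (i + 1)

def min_index_alt (ordering : List Int) (valueList : List Int) : Option Int :=
  min_index_alt_scan (PySem.Set.ofList valueList) ordering 0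

-- ===== PRECONDITION & SPEC =====
def Spec_min_index (ordering : List Int) (valueList : List Int) (out : Option Int) : Prop := out = min_index_alt ordering valueList
instance (ordering : List Int) (valueList : List Int) (out : Option Int) : Decidable (Spec_min_index ordering valueList out) := by unfold Spec_min_index; infer_instance

-- ===== CLAIM (what is proved, stated in full; the proofs are below) =====
def Claim_equal_min_index : Prop := ∀ (ordering : List Int) (valueList : List Int), Dom_min_index ordering valueList → Spec_min_index ordering valueList (min_index ordering valueList)

-- ===== LEMMAS AND PROOFS =====

-- min of two optional Nat indices
def omin : Option Nat → Option Nat → Option Nat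
  | none, b => b
  | some a, none => some a
  | some a, some b => some (min a b)

-- the minimum, over valueList, of each value's first index in ordering (the value A computes)
def aMin (ordering : List Int) : List Int → Option Nat
  | [] => none
  | v :: vs => omin (PySem.List.index? ordering v) (aMin ordering vs)

-- A's merge of an Option Int accumulator with an optional Nat index
def liftMin : Option Int → Option Nat → Option Int
  | r, none => r
  | none, some k => some (k : Int)
  | some r, some k => some (min r (k : Int))

theorem step_eq_liftMin (ordering : List Int) (r : Option Int) (v : Int) :
    min_index_step ordering r v = liftMin r (PySem.List.index? ordering v) := by
  unfold min_index_step
  by_cases hv : v ∈ ordering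
  · simp only [hv, if_true]
    rcases h : PySem.List.index? ordering v with _ | k
    · rw [PySem.List.index?_eq_none_iff] at h; exact absurd hv h
    · cases r with
      | none => simp [liftMin]
      | some r =>
        simp only [liftMin]
        split_ifs with hlt
        · simp [min_eq_right (le_of_lt hlt)]
        · have : min r (k : Int) = r := min_eq_left (by omega)
          simp [this]
  · have h : PySem.List.index? ordering v = none := by
      rw [PySem.List.index?_eq_none_iff]; exact hv
    rw [h]
    simp [hv, liftMin]

theorem liftMin_assoc (r : Option Int) (a b : Option Nat) :
    liftMin (liftMin r a) b = liftMin r (omin a b) := by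
  rcases r with _ | r <;> rcases a with _ | a <;> rcases b with _ | b <;>
    simp [liftMin, omin]

theorem foldl_step_eq (ordering : List Int) (vs : List Int) :
    ∀ r : Option Int, vs.foldl (min_index_step ordering) r = liftMin r (aMin ordering vs) := by
  induction vs with
  | nil => intro r; simp [aMin, liftMin]
  | cons v vs ih =>
    intro r
    simp only [List.foldl_cons, aMin]
    rw [ih, step_eq_liftMin, liftMin_assoc]

theorem min_index_eq_aMin (ordering valueList : List Int) :
    min_index ordering valueList = (aMin ordering valueList).map (fun k => (k : Int)) := by
  unfold min_index
  rw [foldl_step_eq]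
  rcases aMin ordering valueList with _ | k <;> simp [liftMin]

theorem aMin_nil (vs : List Int) : aMin [] vs = none := by
  induction vs with
  | nil => rfl
  | cons v vs ih => simp [aMin, PySem.List.index?, ih, omin]

theorem omin_zero_left (b : Option Nat) : omin (some 0) b = some 0 := by
  rcases b with _ | b <;> simp [omin]

theorem omin_zero_right (a : Option Nat) : omin a (some 0) = some 0 := by
  rcases a with _ | a <;> simp [omin]

theorem aMin_cons_of_mem (o : Int) (os vs : List Int) (h : o ∈ vs) :
    aMin (o :: os) vs = some 0 := by
  induction vs with
  | nil => cases h
  | cons v vs ih =>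
    simp only [aMin]
    rcases eq_or_ne v o with rfl | hne
    · rw [PySem.List.index?_cons_self, omin_zero_left]
    · have hmem : o ∈ vs := by
        rcases List.mem_cons.mp h with h' | h'
        · exact absurd h'.symm hne
        · exact h'
      rw [ih hmem, omin_zero_right]

theorem omin_map_succ (a b : Option Nat) :
    omin (a.map (· + 1)) (b.map (· + 1)) = (omin a b).map (· + 1) := by
  rcases a with _ | a <;> rcases b with _ | b <;> simp [omin]

theorem aMin_cons_of_not_mem (o : Int) (os vs : List Int) (h : o ∉ vs) :
    aMin (o :: os) vs = (aMin os vs).map (· + 1) := by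
  induction vs with
  | nil => rfl
  | cons v vs ih =>
    have hne : o ≠ v := fun he => h (he ▸ List.mem_cons_self)
    have hvs : o ∉ vs := fun hm => h (List.mem_cons_of_mem _ hm)
    simp only [aMin]
    rw [PySem.List.index?_cons_of_ne os hne, ih hvs, omin_map_succ]

theorem scan_eq_aMin (vs : List Int) (os : List Int) :
    ∀ i : Int, min_index_alt_scan (PySem.Set.ofList vs) os i
      = (aMin os vs).map (fun k => (k : Int) + i) := by
  induction os with
  | nil => intro i; simp [min_index_alt_scan, aMin_nil]
  | cons o os ih =>
    intro i
    simp only [min_index_alt_scan]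
    by_cases h : o ∈ vs
    · have hc : PySem.Set.contains (PySem.Set.ofList vs) o = true := by
        rw [PySem.Set.contains_iff, PySem.Set.mem_ofList]; exact h
      rw [hc, aMin_cons_of_mem o os vs h]
      simp
    · have hc : PySem.Set.contains (PySem.Set.ofList vs) o = false := by
        rw [Bool.eq_false_iff]
        intro hcon
        rw [PySem.Set.contains_iff, PySem.Set.mem_ofList] at hcon
        exact h hcon
      rw [hc]
      simp only [Bool.false_eq_true, if_false]
      rw [ih (i + 1), aMin_cons_of_not_mem o os vs h]
      rcases aMin os vs with _ | k
      · simp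
      · simp
        omega

-- ===== VERDICT (by name: the statement is the Claim_ definition above) =====
theorem min_index_spec : Claim_equal_min_index := by
  intro ordering valueList _
  unfold Spec_min_index min_index_alt
  rw [scan_eq_aMin, min_index_eq_aMin]
  simp
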